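-- pv_equiv track=rewrite | github.com/ananta888/ananta | agent/services/worker_workspace_service.py | detect_changed_files
-- ===== SOURCE A (Python) =====
-- def detect_changed_files(before: dict[str, tuple[int, int]], after: dict[str, tuple[int, int]]) -> list[str]:
--     changed: set[str] = set()
--     for rel, sig in after.items():
--         if before.get(rel) != sig:
--             changed.add(rel)
--     for rel in before.keys():
--         if rel not in after:
--             changed.add(rel)
--     return sorted(changed)
-- ===== SOURCE B (Python) =====
-- def detect_changed_files(before: dict[str, tuple[int, int]], after: dict[str, tuple[int, int]]) -> list[str]:
--     bs = sorted(before.items(), key=lambda p: p[0])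
--     az = sorted(after.items(), key=lambda p: p[0])
--     out: list[str] = []
--     i = j = 0
--     while i < len(bs) and j < len(az):
--         kb, vb = bs[i]
--         ka, va = az[j]
--         if kb < ka:
--             out.append(kb)
--             i += 1
--         elif ka < kb:
--             out.append(ka)
--             j += 1
--         else:
--             if vb != va:
--                 out.append(kb)
--             i += 1
--             j += 1
--     out.extend(k for k, _ in bs[i:])
--     out.extend(k for k, _ in az[j:])
--     return out
-- ===== Notes on version B (the rewrite author's own statement) =====
-- stated objective: alternative
-- what changed: Instead of collecting changed keys into a set via two directional dict scans and sorting at the end, B sorts both item lists by key once and runs a two-pointer merge over them, emitting missing keys and keys with differing signatures directly in sorted order with no set and no final sort.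
import Mathlib
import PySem

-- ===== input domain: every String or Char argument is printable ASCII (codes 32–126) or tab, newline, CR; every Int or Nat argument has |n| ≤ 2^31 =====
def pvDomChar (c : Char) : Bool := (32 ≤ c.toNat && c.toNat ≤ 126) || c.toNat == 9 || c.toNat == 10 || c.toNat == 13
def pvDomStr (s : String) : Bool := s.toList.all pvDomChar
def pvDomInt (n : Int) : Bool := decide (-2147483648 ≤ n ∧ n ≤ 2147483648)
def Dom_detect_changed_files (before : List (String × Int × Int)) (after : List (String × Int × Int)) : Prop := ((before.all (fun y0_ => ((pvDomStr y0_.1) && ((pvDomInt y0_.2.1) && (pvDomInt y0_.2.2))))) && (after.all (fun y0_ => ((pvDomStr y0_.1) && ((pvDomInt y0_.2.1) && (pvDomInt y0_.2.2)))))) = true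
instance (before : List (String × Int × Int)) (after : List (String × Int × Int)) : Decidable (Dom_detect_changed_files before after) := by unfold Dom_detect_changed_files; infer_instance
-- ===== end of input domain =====

-- B replaces A's set-collection-then-sort with a sort-by-key of both item lists followed by a two-pointer merge that emits changed keys already in order (objective: alternative).


-- ===== PORT A =====
def detect_changed_files (before : List (String × Int × Int)) (after : List (String × Int × Int)) : List String :=
  let b : PySem.Dict String (Int × Int) := PySem.Dict.ofList before
  let a : PySem.Dict String (Int × Int) := PySem.Dict.ofList after
  -- changed = set(); for rel, sig in after.items(): if before.get(rel) != sig: changed.add(rel)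
  let changed : PySem.Set String :=
    a.items.foldl (fun s p => if b.get? p.1 ≠ some p.2 then PySem.Set.add s p.1 else s) PySem.Set.empty
  -- for rel in before.keys(): if rel not in after: changed.add(rel)
  let changed : PySem.Set String :=
    b.keys.foldl (fun s rel => if ¬ a.contains rel then PySem.Set.add s rel else s) changed
  PySem.List.sorted changed (fun x => x) false

-- ===== PORT B =====
-- the two-pointer while loop of Source B as a recursion on the two sorted item lists
def pvMergeChanged : List (String × Int × Int) → List (String × Int × Int) → List String
  | [], ys => ys.map (·.1)                     -- out.extend(k for k,_ in az[j:])
  | x :: xs, [] => x.1 :: (xs.map (·.1))       -- out.extend(k for k,_ in bs[i:])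
  | x :: xs, y :: ys =>
    if x.1 < y.1 then x.1 :: pvMergeChanged xs (y :: ys)
    else if y.1 < x.1 then y.1 :: pvMergeChanged (x :: xs) ys
    else (if x.2 ≠ y.2 then [x.1] else []) ++ pvMergeChanged xs ys

def detect_changed_files_alt (before : List (String × Int × Int)) (after : List (String × Int × Int)) : List String :=
  -- bs = sorted(before.items(), key=lambda p: p[0]); az = sorted(after.items(), key=lambda p: p[0])
  let bs := PySem.List.sorted (PySem.Dict.ofList before).items (fun p => p.1) false
  let az := PySem.List.sorted (PySem.Dict.ofList after).items (fun p => p.1) false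
  pvMergeChanged bs az

-- ===== PRECONDITION & SPEC =====
def Spec_detect_changed_files (before : List (String × Int × Int)) (after : List (String × Int × Int)) (out : List String) : Prop := out = detect_changed_files_alt before after
instance (before : List (String × Int × Int)) (after : List (String × Int × Int)) (out : List String) : Decidable (Spec_detect_changed_files before after out) := by unfold Spec_detect_changed_files; infer_instance

-- ===== CLAIM (what is proved, stated in full; the proofs are below) =====
def Claim_equal_detect_changed_files : Prop := ∀ (before : List (String × Int × Int)) (after : List (String × Int × Int)), Dom_detect_changed_files before after → Spec_detect_changed_files before after (detect_changed_files before after)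

-- ===== LEMMAS AND PROOFS =====

-- first-match lookup by key in an association list
def pvLkp (l : List (String × Int × Int)) (k : String) : Option (Int × Int) :=
  (l.find? (fun p => p.1 == k)).map (·.2)

theorem pvLkp_cons (x : String × Int × Int) (xs : List (String × Int × Int)) (k : String) :
    pvLkp (x :: xs) k = if x.1 = k then some x.2 else pvLkp xs k := by
  by_cases h : x.1 = k <;> simp [pvLkp, h]

theorem pvLkp_isSome_iff (l : List (String × Int × Int)) (k : String) :
    (pvLkp l k).isSome ↔ k ∈ l.map (·.1) := by
  induction l with
  | nil => simp [pvLkp]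
  | cons x xs ih =>
    rw [pvLkp_cons]
    by_cases h : x.1 = k
    · simp [h]
    · simp only [h, if_false, List.map_cons, List.mem_cons]
      rw [ih]
      constructor
      · exact Or.inr
      · rintro (h' | h')
        · exact absurd h'.symm h
        · exact h'

theorem pvLkp_ne_none_iff (l : List (String × Int × Int)) (k : String) :
    pvLkp l k ≠ none ↔ k ∈ l.map (·.1) := by
  rw [← pvLkp_isSome_iff, Option.isSome_iff_ne_none]

theorem pvLkp_eq_none_of_forall_lt (l : List (String × Int × Int)) (k : String)
    (h : ∀ p ∈ l, k < p.1) : pvLkp l k = none := by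
  by_contra hne
  obtain ⟨p, hp, hpk⟩ := List.mem_map.mp ((pvLkp_ne_none_iff l k).mp hne)
  exact absurd (hpk ▸ h p hp) (lt_irrefl k)

-- elements of the merge are keys of one of the inputs
theorem mem_keys_of_mem_pvMergeChanged (xs ys : List (String × Int × Int)) (k : String)
    (h : k ∈ pvMergeChanged xs ys) : k ∈ xs.map (·.1) ∨ k ∈ ys.map (·.1) := by
  induction xs, ys using pvMergeChanged.induct with
  | case1 ys => exact Or.inr (by simpa [pvMergeChanged] using h)
  | case2 x xs => exact Or.inl (by simpa [pvMergeChanged] using h)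
  | case3 x xs y ys h1 ih =>
    rw [show pvMergeChanged (x :: xs) (y :: ys) = x.1 :: pvMergeChanged xs (y :: ys) by
      simp [pvMergeChanged, h1]] at h
    rcases List.mem_cons.mp h with rfl | h
    · exact Or.inl (by simp)
    · rcases ih h with h | h
      · exact Or.inl (by simp [h])
      · exact Or.inr h
  | case4 x xs y ys h1 h2 ih =>
    rw [show pvMergeChanged (x :: xs) (y :: ys) = y.1 :: pvMergeChanged (x :: xs) ys by
      simp [pvMergeChanged, h1, h2]] at h
    rcases List.mem_cons.mp h with rfl | h
    · exact Or.inr (by simp)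
    · rcases ih h with h | h
      · exact Or.inl h
      · exact Or.inr (by simp [h])
  | case5 x xs y ys h1 h2 ih =>
    rw [show pvMergeChanged (x :: xs) (y :: ys)
          = (if x.2 ≠ y.2 then [x.1] else []) ++ pvMergeChanged xs ys by
      simp [pvMergeChanged, h1, h2]] at h
    rcases List.mem_append.mp h with h | h
    · have : k = x.1 := by by_cases hv : x.2 = y.2 <;> simp [hv] at h <;> simp [h]
      exact Or.inl (by simp [this])
    · rcases ih h with h | h
      · exact Or.inl (by simp [h])
      · exact Or.inr (by simp [h])

-- membership in the merge output, for key-strictly-sorted inputs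
theorem mem_pvMergeChanged (xs ys : List (String × Int × Int))
    (hx : xs.Pairwise (fun p q => p.1 < q.1)) (hy : ys.Pairwise (fun p q => p.1 < q.1))
    (k : String) : k ∈ pvMergeChanged xs ys ↔ pvLkp xs k ≠ pvLkp ys k := by
  induction xs, ys using pvMergeChanged.induct with
  | case1 ys =>
    rw [show pvMergeChanged [] ys = ys.map (·.1) by simp [pvMergeChanged]]
    have : pvLkp [] k = none := rfl
    rw [this]
    constructor
    · intro hm; rw [ne_comm]; exact (pvLkp_ne_none_iff ys k).mpr hm
    · intro hne; exact (pvLkp_ne_none_iff ys k).mp (Ne.symm hne)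
  | case2 x xs =>
    rw [show pvMergeChanged (x :: xs) [] = x.1 :: xs.map (·.1) by simp [pvMergeChanged]]
    have : pvLkp [] k = none := rfl
    rw [this]
    constructor
    · intro hm; exact (pvLkp_ne_none_iff (x :: xs) k).mpr (by simpa using hm)
    · intro hne; simpa using (pvLkp_ne_none_iff (x :: xs) k).mp hne
  | case3 x xs y ys h1 ih =>
    have hx' := (List.pairwise_cons.mp hx).2
    rw [show pvMergeChanged (x :: xs) (y :: ys) = x.1 :: pvMergeChanged xs (y :: ys) by
      simp [pvMergeChanged, h1]]
    by_cases hk : x.1 = k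
    · subst hk
      have hnone : pvLkp (y :: ys) x.1 = none := by
        apply pvLkp_eq_none_of_forall_lt
        intro p hp
        rcases List.mem_cons.mp hp with rfl | hp
        · exact h1
        · exact lt_trans h1 ((List.pairwise_cons.mp hy).1 p hp)
      simp [pvLkp_cons, hnone]
    · rw [pvLkp_cons]
      simp only [hk, if_false, List.mem_cons]
      rw [ih hx' hy]
      simp [Ne.symm hk]
  | case4 x xs y ys h1 h2 ih =>
    have hy' := (List.pairwise_cons.mp hy).2
    rw [show pvMergeChanged (x :: xs) (y :: ys) = y.1 :: pvMergeChanged (x :: xs) ys by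
      simp [pvMergeChanged, h1, h2]]
    by_cases hk : y.1 = k
    · subst hk
      have hnone : pvLkp (x :: xs) y.1 = none := by
        apply pvLkp_eq_none_of_forall_lt
        intro p hp
        rcases List.mem_cons.mp hp with rfl | hp
        · exact h2
        · exact lt_trans h2 ((List.pairwise_cons.mp hx).1 p hp)
      simp [pvLkp_cons, hnone]
    · rw [pvLkp_cons (xs := ys)]
      simp only [hk, if_false, List.mem_cons]
      rw [ih hx hy']
      simp [Ne.symm hk]
  | case5 x xs y ys h1 h2 ih =>
    have hx' := (List.pairwise_cons.mp hx).2
    have hy' := (List.pairwise_cons.mp hy).2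
    have hxy : x.1 = y.1 := le_antisymm (not_lt.mp h2) (not_lt.mp h1)
    rw [show pvMergeChanged (x :: xs) (y :: ys)
          = (if x.2 ≠ y.2 then [x.1] else []) ++ pvMergeChanged xs ys by
      simp [pvMergeChanged, h1, h2]]
    by_cases hk : x.1 = k
    · subst hk
      have hnx : pvLkp xs x.1 = none :=
        pvLkp_eq_none_of_forall_lt _ _ (fun p hp => (List.pairwise_cons.mp hx).1 p hp)
      have hny : pvLkp ys x.1 = none :=
        pvLkp_eq_none_of_forall_lt _ _ (fun p hp => hxy ▸ (List.pairwise_cons.mp hy).1 p hp)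
      have hnot : x.1 ∉ pvMergeChanged xs ys := by
        intro hm
        rw [ih hx' hy', hnx, hny] at hm
        exact hm rfl
      have hnoty : y.1 ∉ pvMergeChanged xs ys := hxy ▸ hnot
      rw [pvLkp_cons, pvLkp_cons]
      by_cases hv : x.2 = y.2 <;>
        simp [hv, hxy, hnoty]
    · rw [pvLkp_cons, pvLkp_cons]
      have hky : ¬ (y.1 = k) := hxy ▸ hk
      simp only [hk, hky, if_false]
      rw [← ih hx' hy']
      by_cases hv : x.2 = y.2 <;> simp [hv, Ne.symm hk]

-- the merge output is strictly increasing for key-strictly-sorted inputs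
theorem pairwise_pvMergeChanged (xs ys : List (String × Int × Int))
    (hx : xs.Pairwise (fun p q => p.1 < q.1)) (hy : ys.Pairwise (fun p q => p.1 < q.1)) :
    (pvMergeChanged xs ys).Pairwise (· < ·) := by
  induction xs, ys using pvMergeChanged.induct with
  | case1 ys =>
    rw [show pvMergeChanged [] ys = ys.map (·.1) by simp [pvMergeChanged]]
    exact List.Pairwise.map _ (fun {p q} h => h) hy
  | case2 x xs =>
    rw [show pvMergeChanged (x :: xs) [] = x.1 :: xs.map (·.1) by simp [pvMergeChanged]]
    have h2 : ((x :: xs).map (fun p => p.1)).Pairwise (fun a b : String => a < b) :=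
      List.Pairwise.map _ (fun _ _ h => h) hx
    simpa using h2
  | case3 x xs y ys h1 ih =>
    have hx' := (List.pairwise_cons.mp hx).2
    rw [show pvMergeChanged (x :: xs) (y :: ys) = x.1 :: pvMergeChanged xs (y :: ys) by
      simp [pvMergeChanged, h1]]
    refine List.pairwise_cons.mpr ⟨?_, ih hx' hy⟩
    intro k hk
    rcases mem_keys_of_mem_pvMergeChanged _ _ _ hk with h | h
    · obtain ⟨p, hp, rfl⟩ := List.mem_map.mp h
      exact (List.pairwise_cons.mp hx).1 p hp
    · obtain ⟨p, hp, rfl⟩ := List.mem_map.mp h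
      rcases List.mem_cons.mp hp with rfl | hp
      · exact h1
      · exact lt_trans h1 ((List.pairwise_cons.mp hy).1 p hp)
  | case4 x xs y ys h1 h2 ih =>
    have hy' := (List.pairwise_cons.mp hy).2
    rw [show pvMergeChanged (x :: xs) (y :: ys) = y.1 :: pvMergeChanged (x :: xs) ys by
      simp [pvMergeChanged, h1, h2]]
    refine List.pairwise_cons.mpr ⟨?_, ih hx hy'⟩
    intro k hk
    rcases mem_keys_of_mem_pvMergeChanged _ _ _ hk with h | h
    · obtain ⟨p, hp, rfl⟩ := List.mem_map.mp h
      rcases List.mem_cons.mp hp with rfl | hp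
      · exact h2
      · exact lt_trans h2 ((List.pairwise_cons.mp hx).1 p hp)
    · obtain ⟨p, hp, rfl⟩ := List.mem_map.mp h
      exact (List.pairwise_cons.mp hy).1 p hp
  | case5 x xs y ys h1 h2 ih =>
    have hx' := (List.pairwise_cons.mp hx).2
    have hy' := (List.pairwise_cons.mp hy).2
    have hxy : x.1 = y.1 := le_antisymm (not_lt.mp h2) (not_lt.mp h1)
    rw [show pvMergeChanged (x :: xs) (y :: ys)
          = (if x.2 ≠ y.2 then [x.1] else []) ++ pvMergeChanged xs ys by
      simp [pvMergeChanged, h1, h2]]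
    have htail := ih hx' hy'
    by_cases hv : x.2 = y.2
    · simpa [hv] using htail
    · simp only [hv, ne_eq, not_false_iff, if_pos, List.singleton_append]
      refine List.pairwise_cons.mpr ⟨?_, htail⟩
      intro k hk
      rcases mem_keys_of_mem_pvMergeChanged _ _ _ hk with h | h
      · obtain ⟨p, hp, rfl⟩ := List.mem_map.mp h
        exact (List.pairwise_cons.mp hx).1 p hp
      · obtain ⟨p, hp, rfl⟩ := List.mem_map.mp h
        exact hxy ▸ (List.pairwise_cons.mp hy).1 p hp

-- membership in a "for x in l: if c(x): s.add(f(x))" loop (specific to A's two loops)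
theorem mem_foldl_add_if {α β : Type} [BEq α] [LawfulBEq α]
    (l : List β) (c : β → Prop) [DecidablePred c] (f : β → α) (s : PySem.Set α) (y : α) :
    y ∈ l.foldl (fun s p => if c p then PySem.Set.add s (f p) else s) s ↔
      y ∈ s ∨ ∃ p ∈ l, c p ∧ y = f p := by
  induction l generalizing s with
  | nil => simp
  | cons h t ih =>
    simp only [List.foldl_cons, ih]
    by_cases hc : c h
    · simp only [hc, if_pos, PySem.Set.mem_add]
      constructor
      · rintro ((h | rfl) | h)
        · exact Or.inl h
        · exact Or.inr ⟨h, List.mem_cons_self .., hc, rfl⟩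
        · rcases h with ⟨p, hp, hcp, rfl⟩
          exact Or.inr ⟨p, List.mem_cons_of_mem _ hp, hcp, rfl⟩
      · rintro (h | ⟨p, hp, hcp, rfl⟩)
        · exact Or.inl (Or.inl h)
        · rcases List.mem_cons.mp hp with rfl | hp
          · exact Or.inl (Or.inr rfl)
          · exact Or.inr ⟨p, hp, hcp, rfl⟩
    · simp only [hc, if_neg, not_false_iff]
      constructor
      · rintro (h | ⟨p, hp, hcp, rfl⟩)
        · exact Or.inl h
        · exact Or.inr ⟨p, List.mem_cons_of_mem _ hp, hcp, rfl⟩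
      · rintro (h | ⟨p, hp, hcp, rfl⟩)
        · exact Or.inl h
        · rcases List.mem_cons.mp hp with rfl | hp
          · exact absurd hcp hc
          · exact Or.inr ⟨p, hp, hcp, rfl⟩

-- nodup is preserved by such a loop
theorem nodup_foldl_add_if {α β : Type} [BEq α] [LawfulBEq α]
    (l : List β) (c : β → Prop) [DecidablePred c] (f : β → α) (s : PySem.Set α) (hs : s.Nodup) :
    (l.foldl (fun s p => if c p then PySem.Set.add s (f p) else s) s).Nodup := by
  induction l generalizing s with
  | nil => exact hs
  | cons h t ih =>
    simp only [List.foldl_cons]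
    by_cases hc : c h
    · simp only [hc, if_pos]; exact ih _ (PySem.Set.nodup_add _ _ hs)
    · simp only [hc, if_neg, not_false_iff]; exact ih _ hs

-- a ≤-sorted association list with nodup keys is strictly key-sorted
theorem pairwise_lt_of_le_nodup (l : List (String × Int × Int))
    (hle : l.Pairwise (fun p q => p.1 ≤ q.1)) (hnd : (l.map (·.1)).Nodup) :
    l.Pairwise (fun p q => p.1 < q.1) := by
  induction l with
  | nil => exact List.Pairwise.nil
  | cons x xs ih =>
    obtain ⟨h1, h2⟩ := List.pairwise_cons.mp hle
    have hnd' := hnd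
    simp only [List.map_cons, List.nodup_cons] at hnd'
    refine List.pairwise_cons.mpr ⟨?_, ih h2 hnd'.2⟩
    intro p hp
    exact lt_of_le_of_ne (h1 p hp) (fun he => hnd'.1 (he ▸ List.mem_map.mpr ⟨p, hp, rfl⟩))

-- pvLkp on the sorted item list is the dict lookup
theorem pvLkp_sorted_items (d : PySem.Dict String (Int × Int)) (hnd : d.keys.Nodup) (k : String) :
    pvLkp (PySem.List.sorted d.items (fun p => p.1) false) k = d.get? k := by
  have hperm : (PySem.List.sorted d.items (fun p => p.1) false).Perm d.items :=
    PySem.List.sorted_perm _ _ _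
  cases hs : pvLkp (PySem.List.sorted d.items (fun p => p.1) false) k with
  | none =>
    have hnm : k ∉ (PySem.List.sorted d.items (fun p => p.1) false).map (·.1) := by
      intro hm
      exact (pvLkp_ne_none_iff _ _).mpr hm hs
    have : k ∉ d.keys := by
      intro hm
      exact hnm ((hperm.map (·.1)).mem_iff.mpr hm)
    exact ((PySem.Dict.get?_eq_none_iff_not_mem_keys d k).mpr this).symm
  | some v =>
    obtain ⟨p, hfind⟩ : ∃ p, (PySem.List.sorted d.items (fun p => p.1) false).find? (fun p => p.1 == k) = some p := by
      cases hf : (PySem.List.sorted d.items (fun p => p.1) false).find? (fun p => p.1 == k) with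
      | none => simp [pvLkp, hf] at hs
      | some p => exact ⟨p, rfl⟩
    have hv : p.2 = v := by simpa [pvLkp, hfind] using hs
    have hpk : p.1 = k := by simpa using List.find?_some hfind
    have hpmem : p ∈ d.items := hperm.mem_iff.mp (List.mem_of_find?_eq_some hfind)
    have : d.get? p.1 = some p.2 := PySem.Dict.get?_of_mem_items d hpmem hnd
    rw [← hpk, this, hv]

theorem detect_changed_files_spec : Claim_equal_detect_changed_files := by
  intro before after _
  unfold Spec_detect_changed_files detect_changed_files detect_changed_files_alt
  set b : PySem.Dict String (Int × Int) := PySem.Dict.ofList before with hb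
  set a : PySem.Dict String (Int × Int) := PySem.Dict.ofList after with ha
  have hak : a.keys.Nodup := PySem.Dict.nodup_keys_ofList after
  have hbk : b.keys.Nodup := PySem.Dict.nodup_keys_ofList before
  simp only
  set bs := PySem.List.sorted b.items (fun p => p.1) false with hbs
  set az := PySem.List.sorted a.items (fun p => p.1) false with haz
  have hbperm : bs.Perm b.items := PySem.List.sorted_perm _ _ _
  have haperm : az.Perm a.items := PySem.List.sorted_perm _ _ _
  have hkb : b.keys = b.items.map (·.1) := rfl
  have hka : a.keys = a.items.map (·.1) := rfl
  have hbnd : (bs.map (·.1)).Nodup := (List.Perm.nodup_iff (hbperm.map (·.1))).mpr (hkb ▸ hbk)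
  have hand : (az.map (·.1)).Nodup := (List.Perm.nodup_iff (haperm.map (·.1))).mpr (hka ▸ hak)
  have hbsp : bs.Pairwise (fun p q => p.1 < q.1) :=
    pairwise_lt_of_le_nodup _ (PySem.List.sorted_pairwise _ _) hbnd
  have hasp : az.Pairwise (fun p q => p.1 < q.1) :=
    pairwise_lt_of_le_nodup _ (PySem.List.sorted_pairwise _ _) hand
  have hlkb : ∀ k, pvLkp bs k = b.get? k := fun k => pvLkp_sorted_items b hbk k
  have hlka : ∀ k, pvLkp az k = a.get? k := fun k => pvLkp_sorted_items a hak k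
  apply PySem.List.sorted_eq_of_perm_of_pairwise_lt (key := fun x => x)
  · -- (pvMergeChanged bs az).Perm changed
    apply (List.perm_ext_iff_of_nodup _ _).mpr
    · intro x
      rw [mem_pvMergeChanged bs az hbsp hasp x, hlkb, hlka]
      rw [mem_foldl_add_if, mem_foldl_add_if]
      constructor
      · intro hne
        by_cases hxa : x ∈ a.keys
        · have h1 : a.get? x ≠ none :=
            fun h => ((PySem.Dict.get?_eq_none_iff_not_mem_keys a x).mp h) hxa
          obtain ⟨v, hv⟩ := Option.ne_none_iff_exists'.mp h1
          refine Or.inl (Or.inr ⟨(x, v), PySem.Dict.mem_items_of_get?_eq_some a hv, ?_, rfl⟩)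
          rw [hv] at hne; exact hne
        · have hga : a.get? x = none := (PySem.Dict.get?_eq_none_iff_not_mem_keys a x).mpr hxa
          have hgb : b.get? x ≠ none := by rw [← hga]; exact hne
          have hxb : x ∈ b.keys := by
            by_contra hxb
            exact hgb ((PySem.Dict.get?_eq_none_iff_not_mem_keys b x).mpr hxb)
          refine Or.inr ⟨x, hxb, ?_, rfl⟩
          exact fun hc => hxa ((PySem.Dict.contains_iff_mem_keys a x).mp hc)
      · intro hcase
        obtain (h0 | ⟨p, hp, hne, hx⟩) | ⟨q, hq, hnc, hx⟩ := hcase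
        · simp at h0
        · subst hx
          have hget : a.get? p.1 = some p.2 := PySem.Dict.get?_of_mem_items a hp hak
          rw [hget]; exact fun h => hne h
        · subst hx
          have hga : a.get? x = none :=
            (PySem.Dict.get?_eq_none_iff_not_mem_keys a x).mpr
              (fun hm => hnc ((PySem.Dict.contains_iff_mem_keys a x).mpr hm))
          have hgb : b.get? x ≠ none :=
            fun h => ((PySem.Dict.get?_eq_none_iff_not_mem_keys b x).mp h) hq
          rw [hga]; exact hgb
    · exact (pairwise_pvMergeChanged bs az hbsp hasp).nodup
    · exact nodup_foldl_add_if _ _ _ _ (nodup_foldl_add_if _ _ _ _ List.nodup_nil)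
  · exact pairwise_pvMergeChanged bs az hbsp hasp
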